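-- pv_equiv track=rewrite | github.com/chemhedgehog/8 | main.py | kbig
-- ===== SOURCE A (Python) =====
-- def kbig(nums,k):
--     n=len(nums)
--     order = []
--     order.append(1)
--     for i in range(n):
--         order.append(1)
--         for j in range(i):
--             if nums[i]<nums[j]:
--                 order[i]+=1
--             else:
--                 order[j]+=1
--     for i in range(n):
--         if order[i]==k:
--             return nums[i]
-- ===== SOURCE B (Python) =====
-- def kbig(nums, k):
--     # A's pairwise-comparison ranks are a permutation of 1..n that orders the
--     # elements descending by value, so the element of rank k is simply the
--     # k-th largest value (duplicates counted).
--     if 1 <= k <= len(nums):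
--         return sorted(nums, reverse=True)[k - 1]
--     return None
-- ===== Notes on version B (the rewrite author's own statement) =====
-- stated objective: faster
-- what changed: Replaces the O(n^2) pairwise rank-counting table and linear rank scan with a single descending sort and direct index: rank-k element is the k-th largest value.
import Mathlib
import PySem

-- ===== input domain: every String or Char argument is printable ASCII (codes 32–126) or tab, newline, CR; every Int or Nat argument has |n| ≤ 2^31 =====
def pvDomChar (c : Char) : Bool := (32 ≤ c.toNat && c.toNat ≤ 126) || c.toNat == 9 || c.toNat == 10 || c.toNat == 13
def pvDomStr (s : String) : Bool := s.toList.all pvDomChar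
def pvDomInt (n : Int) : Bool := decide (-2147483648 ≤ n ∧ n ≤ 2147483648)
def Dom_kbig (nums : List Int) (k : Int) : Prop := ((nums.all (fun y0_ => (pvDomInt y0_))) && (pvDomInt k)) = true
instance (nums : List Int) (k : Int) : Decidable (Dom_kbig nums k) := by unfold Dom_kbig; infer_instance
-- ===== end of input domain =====

-- B replaces A's O(n^2) pairwise rank-counting table with one descending sort;
-- the element of rank k is the k-th largest value. A = B on all inputs (both return none when k is not in [1, n]).
-- ===== PORT A =====
def kbig (nums : List Int) (k : Int) : Option Int :=
  let n : Int := PySem.List.len nums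
  let order : List Int := ([] : List Int) ++ [1]
  let order : List Int := (PySem.List.pyRange 0 n 1).foldl (fun order i =>
    let order := order ++ [1]
    (PySem.List.pyRange 0 i 1).foldl (fun order j =>
      if PySem.List.pyGetD nums i 0 < PySem.List.pyGetD nums j 0 then
        PySem.List.pySetD order i (PySem.List.pyGetD order i 0 + 1)
      else
        PySem.List.pySetD order j (PySem.List.pyGetD order j 0 + 1)) order) order
  (PySem.List.pyRange 0 n 1).findSome? (fun i =>
    if PySem.List.pyGetD order i 0 = k then some (PySem.List.pyGetD nums i 0) else none)

-- ===== PORT B =====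
def kbig_alt (nums : List Int) (k : Int) : Option Int :=
  if 1 ≤ k ∧ k ≤ PySem.List.len nums then
    some (PySem.List.pyGetD (PySem.List.sorted nums (fun x => x) true) (k - 1) 0)
  else none

-- ===== PRECONDITION & SPEC =====
def Spec_kbig (nums : List Int) (k : Int) (out : Option Int) : Prop := out = kbig_alt nums k
instance (nums : List Int) (k : Int) (out : Option Int) : Decidable (Spec_kbig nums k out) := by unfold Spec_kbig; infer_instance

-- ===== CLAIM (what is proved, stated in full; the proofs are below) =====
def Claim_equal_kbig : Prop := ∀ (nums : List Int) (k : Int), Dom_kbig nums k → Spec_kbig nums k (kbig nums k)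

-- ===== LEMMAS AND PROOFS =====

def vD (nums : List Int) (p : Nat) : Int := nums.getD p 0
def c1 (nums : List Int) (p : Nat) : Nat :=
  (List.range p).countP (fun j => decide (vD nums p < vD nums j))
def c2 (nums : List Int) (m p : Nat) : Nat :=
  (List.range m).countP (fun j => decide (p < j ∧ vD nums p ≤ vD nums j))
def fOrd (nums : List Int) (m p : Nat) : Int := 1 + ((c1 nums p + c2 nums m p : Nat) : Int)
lemma set_map_range {N q : Nat} (h : Nat → Int) (v : Int) :
    ((List.range N).map h).set q v = (List.range N).map (fun p => if p = q then v else h p) := by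
  apply List.ext_getElem
  · simp
  · intro m h1 h2
    simp at h1
    simp [List.getElem_set, eq_comm]
lemma getD_map_range' {N q : Nat} (h : Nat → Int) (hq : q < N) :
    ((List.range N).map h).getD q 0 = h q := by
  rw [List.getD_eq_getElem _ _ (by simpa using hq)]
  simp
lemma map_range_congr {N : Nat} {h g : Nat → Int} (H : ∀ p, p < N → h p = g p) :
    (List.range N).map h = (List.range N).map g := by
  apply List.map_congr_left
  intro p hp
  exact H p (by simpa using hp)

lemma append2_map_range (i : Nat) (g : Nat → Int) (a b : Int) :
    (List.range i).map g ++ [a, b] =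
      (List.range (i+2)).map (fun p => if p < i then g p else if p = i then a else b) := by
  apply List.ext_getElem
  · simp
  · intro m h1 h2
    simp at h1
    rcases Nat.lt_trichotomy m i with h|h|h
    · rw [List.getElem_append_left (by simpa using h)]
      simp [h]
    · subst h
      rw [List.getElem_append_right (by simp)]
      simp
    · rw [List.getElem_append_right (by simpa using h.le)]
      have : m = i + 1 := by omega
      subst this
      simp [show ¬ (i+1 < i) by omega]

lemma append1_map_range (n : Nat) (g : Nat → Int) (a : Int) :
    (List.range n).map g ++ [a] =
      (List.range (n+1)).map (fun p => if p < n then g p else a) := by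
  apply List.ext_getElem
  · simp
  · intro m h1 h2
    simp at h1
    rcases Nat.lt_trichotomy m n with h|h|h
    · rw [List.getElem_append_left (by simpa using h)]
      simp [h]
    · subst h
      rw [List.getElem_append_right (by simp)]
      simp
    · omega

lemma inner_inv (nums : List Int) (i : Nat) (hi : i < nums.length) (t : Nat) (ht : t ≤ i) :
    ((List.range t).map (fun (k : Nat) => (k : Int))).foldl (fun order j =>
      if PySem.List.pyGetD nums (i : Int) 0 < PySem.List.pyGetD nums j 0 then
        PySem.List.pySetD order (i : Int) (PySem.List.pyGetD order (i : Int) 0 + 1)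
      else
        PySem.List.pySetD order j (PySem.List.pyGetD order j 0 + 1))
      ((List.range (i+2)).map (fun p => if p < i then fOrd nums i p else if p = i then 1 else 1))
    = (List.range (i+2)).map (fun p =>
        if p < i then fOrd nums i p + (if p < t ∧ vD nums p ≤ vD nums i then 1 else 0)
        else if p = i then 1 + (((List.range t).countP (fun j => decide (vD nums i < vD nums j)) : Nat) : Int)
        else 1) := by
  induction t with
  | zero =>
    simp only [List.range_zero, List.map_nil, List.foldl_nil, List.countP_nil]
    apply map_range_congr
    intro p hp
    split_ifs <;> simp_all
  | succ t ih =>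
    have ht' : t ≤ i := by omega
    rw [show ((List.range (t+1)).map (fun (k : Nat) => (k:Int))) = (List.range t).map (fun (k : Nat) => (k:Int)) ++ [(t:Int)] from by
          rw [List.range_succ]; simp,
        List.foldl_append, ih ht']
    simp only [List.foldl_cons, List.foldl_nil]
    rw [show PySem.List.pyGetD nums (i:Int) 0 = vD nums i from by simp [vD],
        show PySem.List.pyGetD nums (t:Int) 0 = vD nums t from by simp [vD]]
    by_cases hc : vD nums i < vD nums t
    · rw [if_pos hc]
      rw [show ∀ L : List Int, PySem.List.pySetD L (i:Int) (PySem.List.pyGetD L (i:Int) 0 + 1)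
            = L.set i (L.getD i 0 + 1) from fun L => by simp]
      rw [getD_map_range' _ (by omega), set_map_range]
      have hcount : (List.range (t+1)).countP (fun j => decide (vD nums i < vD nums j))
          = (List.range t).countP (fun j => decide (vD nums i < vD nums j)) + 1 := by
        rw [List.range_succ, List.countP_append]
        simp [hc]
      apply map_range_congr
      intro p hp
      by_cases h1 : p < i
      · rw [if_neg (by omega), if_pos h1, if_pos h1]
        congr 1
        by_cases hpt : p = t
        · subst hpt
          simp [show ¬ vD nums p ≤ vD nums i from not_le.mpr hc]
        · have hiff : (p ≤ t) ↔ (p < t) := by omega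
          simp [hiff]
      · by_cases h2 : p = i
        · subst h2
          rw [if_pos rfl, if_neg h1, if_pos rfl, if_neg h1, if_pos rfl, hcount]
          push_cast
          ring
        · rw [if_neg h2, if_neg h1, if_neg h2, if_neg h1, if_neg h2]
    · rw [if_neg hc]
      rw [show ∀ L : List Int, PySem.List.pySetD L (t:Int) (PySem.List.pyGetD L (t:Int) 0 + 1)
            = L.set t (L.getD t 0 + 1) from fun L => by simp]
      rw [getD_map_range' _ (by omega), set_map_range]
      have hcount : (List.range (t+1)).countP (fun j => decide (vD nums i < vD nums j))
          = (List.range t).countP (fun j => decide (vD nums i < vD nums j)) := by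
        rw [List.range_succ, List.countP_append]
        simp [hc]
      apply map_range_congr
      intro p hp
      by_cases h1 : p = t
      · subst h1
        have hpi : p < i := by omega
        rw [if_pos rfl, if_pos hpi, if_pos hpi]
        simp [not_lt.mp hc]
      · rw [if_neg h1]
        by_cases h2 : p < i
        · rw [if_pos h2, if_pos h2]
          congr 1
          have hiff : (p ≤ t) ↔ (p < t) := by omega
          simp [hiff]
        · by_cases h3 : p = i
          · subst h3
            rw [if_neg h2, if_pos rfl, if_neg h2, if_pos rfl, hcount]
          · rw [if_neg h2, if_neg h3, if_neg h2, if_neg h3]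

lemma outer_inv (nums : List Int) (m : Nat) (hm : m ≤ nums.length) :
    ((List.range m).map (fun (k : Nat) => (k : Int))).foldl (fun order i =>
      (PySem.List.pyRange 0 i 1).foldl (fun order j =>
        if PySem.List.pyGetD nums i 0 < PySem.List.pyGetD nums j 0 then
          PySem.List.pySetD order i (PySem.List.pyGetD order i 0 + 1)
        else
          PySem.List.pySetD order j (PySem.List.pyGetD order j 0 + 1)) (order ++ [1])) [1]
    = (List.range m).map (fOrd nums m) ++ [1] := by
  induction m with
  | zero => simp
  | succ m ih =>
    rw [show ((List.range (m+1)).map (fun (k : Nat) => (k:Int))) = (List.range m).map (fun (k : Nat) => (k:Int)) ++ [(m:Int)] from by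
          rw [List.range_succ]; simp,
        List.foldl_append, ih (by omega)]
    simp only [List.foldl_cons, List.foldl_nil]
    rw [PySem.List.pyRange_zero_natCast]
    rw [show ((List.range m).map (fOrd nums m) ++ [1]) ++ [1] = (List.range m).map (fOrd nums m) ++ [1, 1] from by simp,
        append2_map_range]
    rw [inner_inv nums m (by omega) m (le_refl m)]
    rw [show ((List.range (m+1)).map (fOrd nums (m+1)) ++ [1]) = (List.range (m+2)).map
          (fun p => if p < m + 1 then fOrd nums (m+1) p else 1) from by
        rw [append1_map_range]]
    apply map_range_congr
    intro p hp
    by_cases h1 : p < m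
    · rw [if_pos h1, if_pos (show p < m + 1 by omega)]
      have hc2 : c2 nums (m+1) p = c2 nums m p + (if p < m ∧ vD nums p ≤ vD nums m then 1 else 0) := by
        unfold c2
        rw [List.range_succ, List.countP_append]
        by_cases hx : vD nums p ≤ vD nums m
        · simp [hx, h1]
        · simp [hx]
      simp only [fOrd, hc2]
      by_cases hx : p < m ∧ vD nums p ≤ vD nums m
      · simp [hx]
        ring
      · simp [hx]
    · by_cases h2 : p = m
      · subst h2
        rw [if_neg h1, if_pos rfl, if_pos (show p < p + 1 by omega)]
        have hc1 : c1 nums p = (List.range p).countP (fun j => decide (vD nums p < vD nums j)) := rfl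
        have hc2 : c2 nums (p+1) p = 0 := by
          unfold c2
          rw [List.countP_eq_zero]
          intro j hj
          simp at hj ⊢
          omega
        simp only [fOrd, hc1, hc2]
        push_cast
        ring
      · rw [if_neg h1, if_neg h2, if_neg (show ¬ p < m + 1 by omega)]

lemma findSome?_congr {α β : Type} {l : List α} {f g : α → Option β}
    (h : ∀ x ∈ l, f x = g x) : l.findSome? f = l.findSome? g := by
  induction l with
  | nil => rfl
  | cons x xs ih =>
    rw [List.findSome?_cons, List.findSome?_cons, h x (by simp)]
    cases g x with
    | some v => rfl
    | none => exact ih (fun y hy => h y (by simp [hy]))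

lemma kbig_eq_findSome (nums : List Int) (k : Int) :
    kbig nums k = (List.range nums.length).findSome?
      (fun p => if fOrd nums nums.length p = k then some (vD nums p) else none) := by
  unfold kbig
  dsimp only
  simp only [PySem.List.len_eq, List.nil_append]
  simp only [PySem.List.pyRange_zero_natCast]
  rw [List.findSome?_map]
  rw [outer_inv nums nums.length (le_refl _)]
  apply findSome?_congr
  intro p hp
  simp only [List.mem_range] at hp
  simp only [Function.comp]
  rw [append1_map_range]
  have h1 : PySem.List.pyGetD ((List.range (nums.length + 1)).map
      (fun q => if q < nums.length then fOrd nums nums.length q else 1)) (p : Int) 0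
      = fOrd nums nums.length p := by
    rw [PySem.List.pyGetD_natCast, getD_map_range' _ (by omega), if_pos hp]
  rw [h1]
  rw [show PySem.List.pyGetD nums (p : Int) 0 = vD nums p from by simp [vD]]

def precB (nums : List Int) (j p : Nat) : Bool :=
  decide (vD nums p < vD nums j ∨ (vD nums j = vD nums p ∧ p < j))
def cntN (nums : List Int) (p : Nat) : Nat :=
  (List.range nums.length).countP (fun j => precB nums j p)
lemma countP_succ_le {l : List Nat} (hnd : l.Nodup) {P Q : Nat → Bool} (a : Nat)
    (ha : a ∈ l) (hPa : P a = false) (hQa : Q a = true) (h : ∀ x ∈ l, P x = true → Q x = true) :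
    l.countP P + 1 ≤ l.countP Q := by
  have h1 : (a :: l.filter P).Nodup := by
    refine List.Nodup.cons ?_ (hnd.filter P)
    intro hmem
    have := List.of_mem_filter hmem
    simp [hPa] at this
  have h2 : (a :: l.filter P) ⊆ l.filter Q := by
    intro x hx
    rcases List.mem_cons.mp hx with rfl | hx
    · exact List.mem_filter.mpr ⟨ha, hQa⟩
    · have hm := List.mem_of_mem_filter hx
      exact List.mem_filter.mpr ⟨hm, h x hm (List.of_mem_filter hx)⟩
  have := (List.subperm_of_subset h1 h2).length_le
  simpa [List.countP_eq_length_filter] using this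
lemma nums_eq_map (nums : List Int) : nums = (List.range nums.length).map (vD nums) := by
  apply List.ext_getElem
  · simp
  · intro m h1 h2
    simp [vD, h1]

lemma precB_self (nums : List Int) (p : Nat) : precB nums p p = false := by
  simp [precB]

lemma cnt_split (nums : List Int) (p : Nat) (hp : p < nums.length) :
    c1 nums p + c2 nums nums.length p = cntN nums p := by
  have hsplit : List.range nums.length
      = List.range p ++ (List.range (nums.length - p)).map (fun j => p + j) := by
    rw [← List.range_add]
    congr 1
    omega
  unfold cntN c1 c2
  rw [hsplit, List.countP_append, List.countP_append, List.countP_map, List.countP_map]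
  have e1 : (List.range p).countP (fun j => precB nums j p)
      = (List.range p).countP (fun j => decide (vD nums p < vD nums j)) := by
    refine List.countP_congr (fun j hj => ?_)
    simp only [List.mem_range] at hj
    simp only [precB]
    simp only [decide_eq_true_eq]
    omega
  have e2 : (List.range p).countP (fun j => decide (p < j ∧ vD nums p ≤ vD nums j)) = 0 := by
    rw [List.countP_eq_zero]
    intro j hj
    simp only [List.mem_range] at hj
    simp only [decide_eq_true_eq]
    omega
  have e3 : (List.range (nums.length - p)).countP ((fun j => precB nums j p) ∘ (fun j => p + j))
      = (List.range (nums.length - p)).countP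
          ((fun j => decide (p < j ∧ vD nums p ≤ vD nums j)) ∘ (fun j => p + j)) := by
    refine List.countP_congr (fun i _ => ?_)
    simp only [Function.comp, precB, decide_eq_true_eq]
    rcases Nat.eq_zero_or_pos i with rfl | hi
    · simp
    · omega
  rw [e1, e2, e3]
  omega

lemma cnt_lt (nums : List Int) (p : Nat) (hp : p < nums.length) : cntN nums p < nums.length := by
  have := countP_succ_le (P := fun j => precB nums j p) (Q := fun _ => true)
    (List.nodup_range) p (List.mem_range.mpr hp) (precB_self nums p) rfl
    (fun x _ _ => rfl)
  simpa [cntN, List.countP_true] using this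

lemma countP_nums (nums : List Int) (P : Int → Bool) :
    nums.countP P = (List.range nums.length).countP (fun j => P (vD nums j)) := by
  conv_lhs => rw [nums_eq_map nums]
  rw [List.countP_map]
  rfl

lemma cnt_bounds (nums : List Int) (p : Nat) (hp : p < nums.length) :
    nums.countP (fun x => decide (vD nums p < x)) ≤ cntN nums p ∧
    cntN nums p < nums.countP (fun x => decide (vD nums p ≤ x)) := by
  constructor
  · rw [countP_nums]
    apply List.countP_mono_left
    intro j _ hj
    simp only [decide_eq_true_eq] at hj
    simp [precB, hj]
  · rw [countP_nums]
    have := countP_succ_le (P := fun j => precB nums j p)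
      (Q := fun j => decide (vD nums p ≤ vD nums j))
      (List.nodup_range) p (List.mem_range.mpr hp) (precB_self nums p)
      (by simp)
      (fun j _ hj => by
        simp only [precB, decide_eq_true_eq] at hj ⊢
        omega)
    unfold cntN
    simp only [] at this ⊢
    omega

lemma desc_bounds (s : List Int) (hpd : List.Pairwise (fun a b => b ≤ a) s)
    (m : Nat) (hm : m < s.length) (v : Int) (hv : s[m] = v) :
    s.countP (fun x => decide (v < x)) ≤ m ∧ m < s.countP (fun x => decide (v ≤ x)) := by
  have hpair : ∀ i j (_ : i < s.length) (_ : j < s.length), i < j → s[j] ≤ s[i] := by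
    rw [List.pairwise_iff_getElem] at hpd
    exact fun i j hi hj hij => hpd i j hi hj hij
  constructor
  · have hsplit : s.countP (fun x => decide (v < x))
        = (s.take m).countP (fun x => decide (v < x))
          + (s.drop m).countP (fun x => decide (v < x)) := by
      conv_lhs => rw [show s = s.take m ++ s.drop m from (List.take_append_drop m s).symm]
      rw [List.countP_append]
    rw [hsplit]
    have h0 : (s.drop m).countP (fun x => decide (v < x)) = 0 := by
      rw [List.countP_eq_zero]
      intro x hx
      rw [List.mem_iff_getElem] at hx
      obtain ⟨i, hi, rfl⟩ := hx
      have hlen : (s.drop m).length = s.length - m := List.length_drop ..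
      have hmi : m + i < s.length := by omega
      have hget : (s.drop m)[i] = s[m + i] := by
        rw [List.getElem_drop]
      rw [hget]
      simp only [decide_eq_true_eq, not_lt]
      rcases Nat.eq_zero_or_pos i with rfl | hipos
      · simp [← hv]
      · exact hv ▸ hpair m (m+i) hm hmi (by omega)
    have h1 : (s.take m).countP (fun x => decide (v < x)) ≤ m :=
      le_trans List.countP_le_length (by simp)
    omega
  · have hsplit : s.countP (fun x => decide (v ≤ x))
        = (s.take (m+1)).countP (fun x => decide (v ≤ x))
          + (s.drop (m+1)).countP (fun x => decide (v ≤ x)) := by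
      conv_lhs => rw [show s = s.take (m+1) ++ s.drop (m+1) from (List.take_append_drop (m+1) s).symm]
      rw [List.countP_append]
    rw [hsplit]
    have h1 : (s.take (m+1)).countP (fun x => decide (v ≤ x)) = (s.take (m+1)).length := by
      rw [List.countP_eq_length]
      intro x hx
      rw [List.mem_iff_getElem] at hx
      obtain ⟨i, hi, rfl⟩ := hx
      have hlen : (s.take (m+1)).length = min (m+1) s.length := List.length_take ..
      have hi' : i < s.length := by omega
      have hget : (s.take (m+1))[i] = s[i] := List.getElem_take ..
      rw [hget]
      simp only [decide_eq_true_eq]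
      rcases Nat.lt_or_ge i m with h | h
      · exact hv ▸ hpair i m hi' hm h
      · have : i = m := by omega
        subst this
        exact le_of_eq hv.symm
    have h2 : (s.take (m+1)).length = m + 1 := by
      rw [List.length_take]
      omega
    omega

lemma rank_val (nums : List Int) (p m : Nat) (hp : p < nums.length)
    (hm : m < (PySem.List.sorted nums (fun x => x) true).length) (hc : cntN nums p = m) :
    vD nums p = (PySem.List.sorted nums (fun x => x) true)[m] := by
  set s := PySem.List.sorted nums (fun x => x) true with hs
  have hperm : s.Perm nums := PySem.List.sorted_perm nums (fun x => x) true
  have hb := cnt_bounds nums p hp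
  have hsb := desc_bounds s (PySem.List.sorted_pairwise_rev nums (fun x => x)) m hm s[m] rfl
  have hc1 := hperm.countP_eq (fun x => decide (s[m] ≤ x))
  have hc2 := hperm.countP_eq (fun x => decide (s[m] < x))
  rcases lt_trichotomy (vD nums p) s[m] with h | h | h
  · exfalso
    have hmono : nums.countP (fun x => decide (s[m] ≤ x))
        ≤ nums.countP (fun x => decide (vD nums p < x)) := by
      apply List.countP_mono_left
      intro x _ hx
      simp only [decide_eq_true_eq] at hx ⊢
      omega
    omega
  · exact h
  · exfalso
    have hmono : nums.countP (fun x => decide (vD nums p ≤ x))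
        ≤ nums.countP (fun x => decide (s[m] < x)) := by
      apply List.countP_mono_left
      intro x _ hx
      simp only [decide_eq_true_eq] at hx ⊢
      omega
    omega

lemma cnt_strict (nums : List Int) (p q : Nat) (hq : q < nums.length)
    (hpq : precB nums q p = true) : cntN nums q < cntN nums p := by
  have := countP_succ_le (P := fun j => precB nums j q) (Q := fun j => precB nums j p)
    (List.nodup_range) q (List.mem_range.mpr hq) (precB_self nums q) hpq
    (fun j _ hj => by
      simp only [precB, decide_eq_true_eq] at hj hpq ⊢
      omega)
  unfold cntN
  omega

lemma cnt_surj (nums : List Int) (m : Nat) (hm : m < nums.length) :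
    ∃ p, p < nums.length ∧ cntN nums p = m := by
  have hinj : Set.InjOn (fun p => cntN nums p) (Finset.range nums.length) := by
    intro p hp' q hq' hpq
    simp only [] at hpq
    simp only [Finset.coe_range, Set.mem_Iio] at hp' hq'
    by_contra hne
    have htri : precB nums q p = true ∨ precB nums p q = true := by
      simp only [precB, decide_eq_true_eq]
      omega
    rcases htri with h | h
    · exact absurd hpq (by have := cnt_strict nums p q hq' h; omega)
    · exact absurd hpq (by have := cnt_strict nums q p hp' h; omega)
  have hsub : Finset.image (fun p => cntN nums p) (Finset.range nums.length)
      ⊆ Finset.range nums.length := by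
    intro x hx
    rw [Finset.mem_image] at hx
    obtain ⟨p, hp', rfl⟩ := hx
    rw [Finset.mem_range] at hp' ⊢
    exact cnt_lt nums p hp'
  have hcard : (Finset.image (fun p => cntN nums p) (Finset.range nums.length)).card
      = nums.length := by
    rw [Finset.card_image_of_injOn hinj, Finset.card_range]
  have heq : Finset.image (fun p => cntN nums p) (Finset.range nums.length)
      = Finset.range nums.length := by
    apply Finset.eq_of_subset_of_card_le hsub
    rw [hcard, Finset.card_range]
  have : m ∈ Finset.image (fun p => cntN nums p) (Finset.range nums.length) := by
    rw [heq, Finset.mem_range]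
    exact hm
  rw [Finset.mem_image] at this
  obtain ⟨p, hp', hpm⟩ := this
  exact ⟨p, Finset.mem_range.mp hp', hpm⟩

lemma findSome?_eq_of {α β : Type} (l : List α) (f : α → Option β) (b : β)
    (hex : ∃ x ∈ l, (f x).isSome) (hall : ∀ x ∈ l, ∀ v, f x = some v → v = b) :
    l.findSome? f = some b := by
  induction l with
  | nil => simp at hex
  | cons x xs ih =>
    rw [List.findSome?_cons]
    cases hfx : f x with
    | some v => simpa using hall x (by simp) v hfx
    | none =>
      apply ih
      · rcases hex with ⟨y, hy, hys⟩
        rcases List.mem_cons.mp hy with rfl | hy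
        · simp [hfx] at hys
        · exact ⟨y, hy, hys⟩
      · intro y hy v hv
        exact hall y (by simp [hy]) v hv

theorem main_eq (nums : List Int) (k : Int) : kbig nums k = kbig_alt nums k := by
  rw [kbig_eq_findSome]
  unfold kbig_alt
  have hlen : PySem.List.len nums = (nums.length : Int) := by simp
  by_cases hk : 1 ≤ k ∧ k ≤ PySem.List.len nums
  · rw [if_pos hk]
    set s := PySem.List.sorted nums (fun x => x) true with hs
    have hslen : s.length = nums.length := (PySem.List.sorted_perm nums (fun x => x) true).length_eq
    obtain ⟨hk1, hk2⟩ := hk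
    rw [hlen] at hk2
    set m := (k-1).toNat with hm'
    have hmk : (m : Int) = k - 1 := by omega
    have hm : m < nums.length := by omega
    have hms : m < s.length := by omega
    have hBval : PySem.List.pyGetD s (k-1) 0 = s[m] := by
      rw [show (k - 1 : Int) = (m : Int) from hmk.symm]
      rw [PySem.List.pyGetD_natCast]
      exact List.getD_eq_getElem _ _ hms
    rw [hBval]
    apply findSome?_eq_of
    · obtain ⟨p, hp, hcp⟩ := cnt_surj nums m hm
      refine ⟨p, List.mem_range.mpr hp, ?_⟩
      have hford : fOrd nums nums.length p = k := by
        have h1 := cnt_split nums p hp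
        simp only [fOrd]
        push_cast
        omega
      rw [if_pos hford]
      simp
    · intro p hp v hv
      simp only [List.mem_range] at hp
      by_cases hford : fOrd nums nums.length p = k
      · rw [if_pos hford] at hv
        have hcp : cntN nums p = m := by
          have h1 := cnt_split nums p hp
          simp only [fOrd] at hford
          push_cast at hford
          omega
        have hval := rank_val nums p m hp hms hcp
        injection hv with hv'
        rw [← hv', hval]
      · rw [if_neg hford] at hv
        cases hv
  · rw [if_neg hk]
    rw [List.findSome?_eq_none_iff]
    intro p hp
    simp only [List.mem_range] at hp
    have h1 := cnt_split nums p hp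
    have h2 := cnt_lt nums p hp
    rw [if_neg]
    rw [hlen] at hk
    simp only [fOrd]
    push_cast
    omega

-- ===== VERDICT (by name: the statement is the Claim_ definition above) =====
theorem kbig_spec : Claim_equal_kbig := fun nums k _ => main_eq nums k
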